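-- pv_equiv track=rewrite | github.com/beaming-sunshine/Source_Compression | JPEG.py | DPCM2
-- ===== SOURCE A (Python) =====
-- def DPCM2(arr):
--     blocks = []
--     for i in range(len(arr)):
--         temp = [[0 for i in range(8)] for i in range(8)]
--         if i == 0:
--             temp[0][0] = arr[0]
--         else:
--             temp[0][0] = arr[i] + blocks[i-1][0][0]
--         blocks.append(temp)
--     return blocks
-- ===== SOURCE B (Python) =====
-- def _scan(a):
--     if len(a) <= 1:
--         return list(a)
--     mid = len(a) // 2
--     left = _scan(a[:mid])
--     right = _scan(a[mid:])
--     off = left[-1]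
--     return left + [off + s for s in right]
--
-- def DPCM2(arr):
--     blocks = []
--     for s in _scan(arr):
--         temp = [[0] * 8 for _ in range(8)]
--         temp[0][0] = s
--         blocks.append(temp)
--     return blocks
-- ===== Notes on version B (the rewrite author's own statement) =====
-- stated objective: alternative
-- what changed: B computes the block corners by a divide-and-conquer scan (split the array, recurse on both halves, offset the right half's results by the left half's total) and then materializes the 8x8 blocks in a separate pass, instead of A's single forward loop that reads the running total back out of the previous block's corner.
import Mathlib
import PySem

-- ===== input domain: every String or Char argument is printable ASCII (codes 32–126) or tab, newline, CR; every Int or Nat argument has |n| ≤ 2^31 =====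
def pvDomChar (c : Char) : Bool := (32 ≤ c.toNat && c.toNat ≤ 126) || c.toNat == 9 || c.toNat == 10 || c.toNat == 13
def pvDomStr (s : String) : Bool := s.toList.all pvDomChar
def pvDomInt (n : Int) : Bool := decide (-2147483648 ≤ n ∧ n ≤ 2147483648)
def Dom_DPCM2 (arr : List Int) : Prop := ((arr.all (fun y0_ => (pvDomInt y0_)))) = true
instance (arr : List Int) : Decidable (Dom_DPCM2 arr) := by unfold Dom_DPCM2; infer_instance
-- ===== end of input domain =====

-- B replaces A's forward loop (which reads the running total out of the previous block's
-- corner) by a divide-and-conquer scan plus a separate block-building pass; equal return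
-- values are proved below.

-- ===== PORT A =====
-- temp[0][0] = v on the fresh all-zero 8x8 block (list .set mirrors the in-place assignment)
def pvSet00 (m : List (List Int)) (v : Int) : List (List Int) :=
  m.set 0 ((m.getD 0 []).set 0 v)

def DPCM2 (arr : List Int) : List (List (List Int)) :=
  (PySem.List.pyRange 0 arr.length 1).foldl
    (fun blocks i =>
      let temp := List.replicate 8 (List.replicate 8 (0 : Int))
      let v : Int :=
        if i = 0 then PySem.List.pyGetD arr 0 0
        else PySem.List.pyGetD arr i 0 +
             ((PySem.List.pyGetD blocks (i - 1) []).getD 0 []).getD 0 0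
      blocks ++ [pvSet00 temp v])
    []

-- ===== PORT B =====
-- divide-and-conquer scan: _scan in Source B, step for step (a[:mid] / a[mid:] as PySem slices)
def pvScan (a : List Int) : List Int :=
  if _h : a.length ≤ 1 then a
  else
    let mid := a.length / 2
    let left := pvScan (PySem.List.slice a none (some (mid : Int)))
    let right := pvScan (PySem.List.slice a (some (mid : Int)) none)
    let off := PySem.List.pyGetD left (-1) 0
    left ++ right.map (fun s => off + s)
termination_by a.length
decreasing_by
  · rw [PySem.List.slice_to_natCast]; simp; omega
  · rw [PySem.List.slice_from_natCast]; simp; omega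

def DPCM2_alt (arr : List Int) : List (List (List Int)) :=
  (pvScan arr).foldl
    (fun blocks s =>
      let temp := List.replicate 8 (List.replicate 8 (0 : Int))
      blocks ++ [temp.set 0 ((temp.getD 0 []).set 0 s)])
    []

-- ===== PRECONDITION & SPEC =====
def Spec_DPCM2 (arr : List Int) (out : List (List (List Int))) : Prop := out = DPCM2_alt arr
instance (arr : List Int) (out : List (List (List Int))) : Decidable (Spec_DPCM2 arr out) := by unfold Spec_DPCM2; infer_instance

-- ===== CLAIM (what is proved, stated in full; the proofs are below) =====
def Claim_equal_DPCM2 : Prop := ∀ (arr : List Int), Dom_DPCM2 arr → Spec_DPCM2 arr (DPCM2 arr)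

-- ===== LEMMAS AND PROOFS =====
-- prefix sums with a starting offset: the common characterisation of both programs
def pvSums : List Int → Int → List Int
  | [], _ => []
  | x :: xs, t => (t + x) :: pvSums xs (t + x)

theorem pvSums_append_one (xs : List Int) (y t : Int) :
    pvSums (xs ++ [y]) t = pvSums xs t ++ [t + xs.sum + y] := by
  induction xs generalizing t with
  | nil => simp [pvSums]
  | cons x xs ih => simp [pvSums, ih]; omega

theorem pvSums_length (xs : List Int) (t : Int) : (pvSums xs t).length = xs.length := by
  induction xs generalizing t with
  | nil => rfl
  | cons x xs ih => simp [pvSums, ih]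

theorem pvSums_getD_last (xs : List Int) (t : Int) (h : xs ≠ []) :
    (pvSums xs t).getD (xs.length - 1) 0 = t + xs.sum := by
  induction xs generalizing t with
  | nil => exact absurd rfl h
  | cons x xs ih =>
    cases xs with
    | nil => simp [pvSums]
    | cons y ys =>
      have := ih (t := t + x) (by simp)
      simp only [pvSums, List.length_cons, Nat.add_sub_cancel] at this ⊢
      rw [List.getD_cons_succ, this]
      simp only [List.sum_cons]; omega

theorem pvSet00_block (v : Int) :
    pvSet00 (List.replicate 8 (List.replicate 8 (0 : Int))) v
      = (v :: List.replicate 7 (0 : Int)) :: List.replicate 7 (List.replicate 8 (0 : Int)) := rfl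

-- A's loop, truncated to the first n steps, yields the blocks of the first n prefix sums
theorem DPCM2_prefix (arr : List Int) (n : Nat) (hn : n ≤ arr.length) :
    (PySem.List.pyRange 0 n 1).foldl
      (fun blocks i =>
        let temp := List.replicate 8 (List.replicate 8 (0 : Int))
        let v : Int :=
          if i = 0 then PySem.List.pyGetD arr 0 0
          else PySem.List.pyGetD arr i 0 +
               ((PySem.List.pyGetD blocks (i - 1) []).getD 0 []).getD 0 0
        blocks ++ [pvSet00 temp v])
      []
    = (pvSums (arr.take n) 0).map
        (fun s => (s :: List.replicate 7 (0 : Int)) :: List.replicate 7 (List.replicate 8 (0 : Int))) := by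
  induction n with
  | zero => simp [pvSums]
  | succ n ih =>
    have hn' : n ≤ arr.length := Nat.le_of_succ_le hn
    have hlt : n < arr.length := hn
    have hsplit : PySem.List.pyRange 0 (↑(n + 1)) 1
        = PySem.List.pyRange 0 (↑n) 1 ++ [(↑n : Int)] := by
      push_cast
      exact PySem.List.pyRange_one_succ_right (by exact_mod_cast Nat.zero_le n)
    rw [hsplit, List.foldl_append, ih hn']
    have htake : arr.take (n + 1) = arr.take n ++ [arr[n]] := by
      rw [List.take_add_one]
      simp [List.getElem?_eq_getElem hlt]
    rw [htake, pvSums_append_one, List.map_append]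
    simp only [List.foldl_cons, List.foldl_nil]
    congr 1
    by_cases h0 : n = 0
    · subst h0
      simp [PySem.List.pyGetD_zero, List.getD_eq_getElem?_getD,
        List.getElem?_eq_getElem hlt]
      rfl
    · have hne : ¬ ((↑n : Int) = 0) := by exact_mod_cast h0
      rw [if_neg hne, pvSet00_block]
      have harr : PySem.List.pyGetD arr (↑n) 0 = arr[n] := by
        simp [List.getD_eq_getElem?_getD, List.getElem?_eq_getElem hlt]
      have hprev : (↑n : Int) - 1 = ↑(n - 1) := by omega
      have htlen : (arr.take n).length = n := by simp [hn']
      have htn : arr.take n ≠ [] := by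
        intro h
        have := congrArg List.length h
        rw [htlen] at this
        simp at this
        omega
      have hslen : (pvSums (arr.take n) 0).length = n := by
        rw [pvSums_length, htlen]
      have hidx : n - 1 < ((pvSums (arr.take n) 0).map
          (fun s => (s :: List.replicate 7 (0 : Int)) :: List.replicate 7 (List.replicate 8 (0 : Int)))).length := by
        simp [hslen]; omega
      have hidx' : n - 1 < (pvSums (arr.take n) 0).length := by omega
      have hlast : (pvSums (arr.take n) 0).getD (n - 1) 0 = 0 + (arr.take n).sum := by
        have := pvSums_getD_last (arr.take n) 0 htn
        rwa [htlen] at this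
      have hcorner :
          ((PySem.List.pyGetD
              ((pvSums (arr.take n) 0).map
                (fun s => (s :: List.replicate 7 (0 : Int)) :: List.replicate 7 (List.replicate 8 (0 : Int))))
              ((↑n : Int) - 1) []).getD 0 []).getD 0 0
            = 0 + (arr.take n).sum := by
        rw [hprev, PySem.List.pyGetD_natCast, List.getD_eq_getElem _ _ hidx, List.getElem_map,
          ← List.getD_eq_getElem _ 0 hidx', hlast]
        simp
      rw [harr, hcorner]
      have : arr[n] + (0 + (arr.take n).sum) = 0 + (arr.take n).sum + arr[n] := by ring
      rw [this, List.map_singleton]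

-- shifting the start offset shifts every prefix sum
theorem pvSums_shift (xs : List Int) (t : Int) :
    pvSums xs t = (pvSums xs 0).map (fun v => t + v) := by
  induction xs generalizing t with
  | nil => rfl
  | cons x xs ih =>
    simp only [pvSums, List.map_cons, Int.zero_add]
    congr 1
    rw [ih (t + x), ih x, List.map_map]
    congr 1
    funext v
    simp [add_assoc]

theorem pvSums_split (xs ys : List Int) (t : Int) :
    pvSums (xs ++ ys) t = pvSums xs t ++ pvSums ys (t + xs.sum) := by
  induction xs generalizing t with
  | nil => simp [pvSums]
  | cons x xs ih => simp [pvSums, ih, add_assoc]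

theorem pvSums_ne_nil (xs : List Int) (t : Int) (h : xs ≠ []) : pvSums xs t ≠ [] := by
  cases xs with
  | nil => exact absurd rfl h
  | cons x xs => simp [pvSums]

theorem pvSums_neg_one (xs : List Int) (t : Int) (h : xs ≠ []) :
    PySem.List.pyGetD (pvSums xs t) (-1) 0 = t + xs.sum := by
  have hne := pvSums_ne_nil xs t h
  have hlen : (pvSums xs t).length = xs.length := pvSums_length xs t
  have hpos : 0 < xs.length := List.length_pos_of_ne_nil h
  rw [PySem.List.pyGetD_neg_one _ _ hne]
  rw [List.getLast_eq_getElem, ← List.getD_eq_getElem (pvSums xs t) 0 (by omega)]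
  rw [hlen]
  exact pvSums_getD_last xs t h

-- the divide-and-conquer scan computes exactly the prefix sums
theorem pvScan_eq (a : List Int) : pvScan a = pvSums a 0 := by
  rw [pvScan]
  by_cases h : a.length ≤ 1
  · rw [dif_pos h]
    cases a with
    | nil => rfl
    | cons x xs =>
      cases xs with
      | nil => simp [pvSums]
      | cons y ys => simp at h
  · rw [dif_neg h]
    simp only [PySem.List.slice_to_natCast, PySem.List.slice_from_natCast]
    have h2 : 2 ≤ a.length := by omega
    have hmid : 1 ≤ a.length / 2 := by omega
    have htn : a.take (a.length / 2) ≠ [] := by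
      rw [← List.length_pos_iff, List.length_take]
      omega
    rw [pvScan_eq (a.take (a.length / 2)), pvScan_eq (a.drop (a.length / 2))]
    rw [pvSums_neg_one _ _ htn]
    have := pvSums_split (a.take (a.length / 2)) (a.drop (a.length / 2)) 0
    rw [List.take_append_drop] at this
    rw [this, pvSums_shift (a.drop (a.length / 2)) (0 + (a.take (a.length / 2)).sum)]
termination_by a.length
decreasing_by
  · simp only [List.length_take]
    omega
  · simp only [List.length_drop]
    omega


-- B's block-building loop is a map over the scan results
theorem DPCM2_alt_eq_map (arr : List Int) :
    DPCM2_alt arr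
      = (pvScan arr).map
          (fun s => (s :: List.replicate 7 (0 : Int)) :: List.replicate 7 (List.replicate 8 (0 : Int))) := by
  unfold DPCM2_alt
  rw [PySem.List.foldl_append_singleton_eq_map]
  rfl

-- ===== VERDICT (by name: the statement is the Claim_ definition above) =====
theorem DPCM2_spec : Claim_equal_DPCM2 := by
  intro arr _
  unfold Spec_DPCM2
  rw [DPCM2_alt_eq_map, pvScan_eq]
  unfold DPCM2
  rw [DPCM2_prefix arr arr.length le_rfl, List.take_length]
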